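-- pv_equiv track=rewrite | github.com/lisugar/ray_network | ray_network/kernel/netray_ip.py | mask_num2dict
-- ===== SOURCE A (Python) =====
-- MAX_UINT=4294967295
--
-- def pm_dict(x0,x1,x2,x3):
--     p0 = x0
--     p1 = x1
--     p2 = x2
--     p3 = x3
--     if x0 == None:
--         p0 = MAX_UINT
--     if x1 == None:
--         p1 = MAX_UINT
--     if x2 == None:
--         p2 = MAX_UINT
--     if x3 == None:
--         p3 = MAX_UINT
--     return {'x0':p0, 'x1':p1, 'x2':p2, 'x3':p3}
--
-- def mask_num2dict(mask,flag): #flag == 0 ipv4 flag == 1 ipv6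
--     maskdict = pm_dict(0,0,0,0)
--     if mask <= 32:
--         count = mask
--         while(count > 0):
--             if(flag == 0):
--                 maskdict['x3']  +=  (1<<(32-count))
--             else :
--                 maskdict['x0']  +=  (1<<(32-count))
--             count -=1
--
--     if mask > 32 and mask <= 64:
--         count  = mask - 32
--         maskdict['x0'] = MAX_UINT
--         while (count > 0):
--             maskdict['x1']  +=  (1<<(32-count))
--             count -=1
--
--     if mask > 64 and mask <= 96:
--         count  = mask - 64
--         maskdict['x0'] = MAX_UINT
--         maskdict['x1'] = MAX_UINT
--         while (count > 0):
--             maskdict['x2']  +=  (1<<(32-count))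
--             count -=1
--
--     if mask > 96 and mask <= 128:
--         count  = mask - 96
--         maskdict['x0'] = MAX_UINT
--         maskdict['x1'] = MAX_UINT
--         maskdict['x2'] = MAX_UINT
--         while (count > 0):
--             maskdict['x3']  +=  (1<<(32-count))
--             count -=1
--
--     return maskdict
-- ===== SOURCE B (Python) =====
-- MAX_UINT = 4294967295
--
-- def _top(n):
--     # value with the top n of 32 bits set (0 for n <= 0); only called with n <= 32
--     return 0 if n <= 0 else MAX_UINT ^ ((1 << (32 - n)) - 1)
--
-- def mask_num2dict(mask, flag):  # flag == 0 ipv4, else ipv6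
--     if mask <= 32:
--         seg = _top(mask)
--         if flag == 0:
--             return {'x0': 0, 'x1': 0, 'x2': 0, 'x3': seg}
--         return {'x0': seg, 'x1': 0, 'x2': 0, 'x3': 0}
--     if mask <= 64:
--         return {'x0': MAX_UINT, 'x1': _top(mask - 32), 'x2': 0, 'x3': 0}
--     if mask <= 96:
--         return {'x0': MAX_UINT, 'x1': MAX_UINT, 'x2': _top(mask - 64), 'x3': 0}
--     if mask <= 128:
--         return {'x0': MAX_UINT, 'x1': MAX_UINT, 'x2': MAX_UINT, 'x3': _top(mask - 96)}
--     return {'x0': 0, 'x1': 0, 'x2': 0, 'x3': 0}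
-- ===== Notes on version B (the rewrite author's own statement) =====
-- stated objective: simpler
-- what changed: Replaces each bit-accumulating while-loop with a closed-form top-n-bits value (MAX_UINT ^ ((1<<(32-n))-1)) and returns one dict literal per mask-range branch instead of mutating a shared dict.
import Mathlib
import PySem

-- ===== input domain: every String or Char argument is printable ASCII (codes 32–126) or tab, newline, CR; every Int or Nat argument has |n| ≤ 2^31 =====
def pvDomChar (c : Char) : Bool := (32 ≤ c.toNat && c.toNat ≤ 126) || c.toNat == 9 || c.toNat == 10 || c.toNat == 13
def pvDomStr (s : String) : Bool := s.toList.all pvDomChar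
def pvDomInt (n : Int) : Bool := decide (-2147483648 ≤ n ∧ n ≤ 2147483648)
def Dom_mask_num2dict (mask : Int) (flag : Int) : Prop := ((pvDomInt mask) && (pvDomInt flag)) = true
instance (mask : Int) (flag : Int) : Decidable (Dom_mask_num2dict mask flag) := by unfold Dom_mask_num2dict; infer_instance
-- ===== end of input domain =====

-- B replaces A's per-bit while-loops by a closed-form top-n-bits value per branch (objective: simpler).

-- ===== PORT A =====
def MAX_UINT : Int := 4294967295

-- pm_dict: the `xN == None` tests are always False for the int arguments A passes, so they drop out.
def pm_dict (x0 x1 x2 x3 : Int) : PySem.Dict String Int :=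
  PySem.Dict.ofList [("x0", x0), ("x1", x1), ("x2", x2), ("x3", x3)]

-- while(count>0) of the first branch, with the flag test inside the body as in A;
-- the counter is made structural: the loop runs exactly max(count,0) times, count = n on entry to each body.
def loop1N (flag : Int) : Nat → PySem.Dict String Int → PySem.Dict String Int
  | 0, d => d
  | n + 1, d =>
      loop1N flag n
        (if flag == 0 then d.modify "x3" 0 (· + ((1 : Int) <<< ((32 : Int) - ((n : Int) + 1)).toNat))
         else d.modify "x0" 0 (· + ((1 : Int) <<< ((32 : Int) - ((n : Int) + 1)).toNat)))

def loop1 (flag count : Int) (d : PySem.Dict String Int) : PySem.Dict String Int :=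
  loop1N flag count.toNat d

-- while(count>0) of the later branches, adding into the fixed key `key`.
def loopKN (key : String) : Nat → PySem.Dict String Int → PySem.Dict String Int
  | 0, d => d
  | n + 1, d =>
      loopKN key n (d.modify key 0 (· + ((1 : Int) <<< ((32 : Int) - ((n : Int) + 1)).toNat)))

def loopK (key : String) (count : Int) (d : PySem.Dict String Int) : PySem.Dict String Int :=
  loopKN key count.toNat d

def mask_num2dict (mask : Int) (flag : Int) : List (String × Int) :=
  let d0 := pm_dict 0 0 0 0
  let d1 := if mask ≤ 32 then loop1 flag mask d0 else d0
  let d2 := if 32 < mask ∧ mask ≤ 64 then loopK "x1" (mask - 32) (d1.insert "x0" MAX_UINT) else d1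
  let d3 := if 64 < mask ∧ mask ≤ 96 then
      loopK "x2" (mask - 64) ((d2.insert "x0" MAX_UINT).insert "x1" MAX_UINT) else d2
  let d4 := if 96 < mask ∧ mask ≤ 128 then
      loopK "x3" (mask - 96) (((d3.insert "x0" MAX_UINT).insert "x1" MAX_UINT).insert "x2" MAX_UINT) else d3
  d4.items

-- ===== PORT B =====
-- value with the top n of 32 bits set (0 for n <= 0); only called with n <= 32
def topBits (n : Int) : Int :=
  if n ≤ 0 then 0 else Int.xor MAX_UINT (((1 : Int) <<< ((32 : Int) - n).toNat) - 1)

def mask_num2dict_alt (mask : Int) (flag : Int) : List (String × Int) :=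
  if mask ≤ 32 then
    let seg := topBits mask
    if flag == 0 then [("x0", 0), ("x1", 0), ("x2", 0), ("x3", seg)]
    else [("x0", seg), ("x1", 0), ("x2", 0), ("x3", 0)]
  else if mask ≤ 64 then [("x0", MAX_UINT), ("x1", topBits (mask - 32)), ("x2", 0), ("x3", 0)]
  else if mask ≤ 96 then [("x0", MAX_UINT), ("x1", MAX_UINT), ("x2", topBits (mask - 64)), ("x3", 0)]
  else if mask ≤ 128 then [("x0", MAX_UINT), ("x1", MAX_UINT), ("x2", MAX_UINT), ("x3", topBits (mask - 96))]
  else [("x0", 0), ("x1", 0), ("x2", 0), ("x3", 0)]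

-- ===== PRECONDITION & SPEC =====
def Spec_mask_num2dict (mask : Int) (flag : Int) (out : List (String × Int)) : Prop := out = mask_num2dict_alt mask flag
instance (mask : Int) (flag : Int) (out : List (String × Int)) : Decidable (Spec_mask_num2dict mask flag out) := by unfold Spec_mask_num2dict; infer_instance

-- ===== CLAIM (what is proved, stated in full; the proofs are below) =====
def Claim_equal_mask_num2dict : Prop := ∀ (mask : Int) (flag : Int), Dom_mask_num2dict mask flag → Spec_mask_num2dict mask flag (mask_num2dict mask flag)

-- ===== LEMMAS AND PROOFS =====

theorem loop1N_congr (flag flag' : Int) (hf : ¬ flag = 0) (hf' : ¬ flag' = 0) :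
    ∀ (n : Nat) (d : PySem.Dict String Int), loop1N flag n d = loop1N flag' n d := by
  intro n
  induction n with
  | zero => intro d; rfl
  | succ n ih =>
      intro d
      simp only [loop1N, beq_iff_eq, if_neg hf, if_neg hf']
      exact ih _

theorem mask_num2dict_flag (mask flag : Int) (hf : ¬ flag = 0) :
    mask_num2dict mask flag = mask_num2dict mask 1 := by
  simp only [mask_num2dict, loop1, loop1N_congr flag 1 hf one_ne_zero]

theorem mask_num2dict_alt_flag (mask flag : Int) (hf : ¬ flag = 0) :
    mask_num2dict_alt mask flag = mask_num2dict_alt mask 1 := by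
  simp only [mask_num2dict_alt, beq_iff_eq, if_neg hf, if_neg (one_ne_zero (α := Int))]

theorem mask_num2dict_flag_big (mask flag : Int) (h : ¬ mask ≤ 32) :
    mask_num2dict mask flag = mask_num2dict mask 0 := by
  simp only [mask_num2dict, if_neg h]

theorem mask_num2dict_alt_flag_big (mask flag : Int) (h : ¬ mask ≤ 32) :
    mask_num2dict_alt mask flag = mask_num2dict_alt mask 0 := by
  simp only [mask_num2dict_alt, if_neg h]

theorem loop1_nonpos (flag count : Int) (d : PySem.Dict String Int) (h : count ≤ 0) :
    loop1 flag count d = d := by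
  simp [loop1, Int.toNat_of_nonpos h, loop1N]

set_option maxRecDepth 8000 in
-- ===== VERDICT (by name: the statement is the Claim_ definition above) =====
theorem mask_num2dict_spec : Claim_equal_mask_num2dict := by
  intro mask flag _
  unfold Spec_mask_num2dict
  by_cases h0 : mask ≤ 0
  · have h32 : mask ≤ 32 := by omega
    have hA : ¬(32 < mask ∧ mask ≤ 64) := by omega
    have hB : ¬(64 < mask ∧ mask ≤ 96) := by omega
    have hC : ¬(96 < mask ∧ mask ≤ 128) := by omega
    simp only [mask_num2dict, mask_num2dict_alt, topBits, if_pos h32, if_pos h0,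
      if_neg hA, if_neg hB, if_neg hC, loop1_nonpos _ _ _ h0]
    split <;> decide
  · by_cases h128 : mask ≤ 128
    · by_cases h32 : mask ≤ 32
      · by_cases hf : flag = 0
        · subst hf
          have h1 : 1 ≤ mask := by omega
          interval_cases mask <;> decide
        · rw [mask_num2dict_flag _ _ hf, mask_num2dict_alt_flag _ _ hf]
          have h1 : 1 ≤ mask := by omega
          interval_cases mask <;> decide
      · rw [mask_num2dict_flag_big _ _ h32, mask_num2dict_alt_flag_big _ _ h32]
        have h33 : 33 ≤ mask := by omega
        have h33' : mask ≤ 128 := h128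
        interval_cases mask <;> decide
    · have h32 : ¬ mask ≤ 32 := by omega
      have h64 : ¬ mask ≤ 64 := by omega
      have h96 : ¬ mask ≤ 96 := by omega
      have h128' : ¬ mask ≤ 128 := by omega
      have hA : ¬(32 < mask ∧ mask ≤ 64) := by omega
      have hB : ¬(64 < mask ∧ mask ≤ 96) := by omega
      have hC : ¬(96 < mask ∧ mask ≤ 128) := by omega
      simp only [mask_num2dict, mask_num2dict_alt, if_neg h32, if_neg h64, if_neg h96,
        if_neg h128', if_neg hA, if_neg hB, if_neg hC]
      decide
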